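-- pv_equiv track=rewrite | github.com/kubrasultann/asl-sign-language-recognition | sign_language/asl_text_app.py | wrap_text_by_chars
-- ===== SOURCE A (Python) =====
-- def wrap_text_by_chars(text, max_chars):
--     lines = []
--     cur = ""
--     for ch in text:
--         if ch == "\n":
--             lines.append(cur)
--             cur = ""
--             continue
--         cur += ch
--         if len(cur) >= max_chars:
--             lines.append(cur)
--             cur = ""
--     if cur:
--         lines.append(cur)
--     return lines
-- ===== SOURCE B (Python) =====
-- def wrap_text_by_chars(text, max_chars):
--     e = max(max_chars, 1)
--     segs = text.split('\n')
--     out = []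
--     for seg in segs[:-1]:
--         i = 0
--         while i < len(seg):
--             out.append(seg[i:i+e])
--             i += e
--         if len(seg) % e == 0:
--             out.append('')
--     last = segs[-1]
--     i = 0
--     while i < len(last):
--         out.append(last[i:i+e])
--         i += e
--     return out
-- ===== Notes on version B (the rewrite author's own statement) =====
-- stated objective: faster
-- what changed: B splits the text on newlines first and then cuts each segment into fixed-size slices (appending the empty line that a newline-triggered flush of an empty or exactly-filled buffer produces for non-final segments), instead of A's single char-by-char accumulator loop with repeated string concatenation.
import Mathlib
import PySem

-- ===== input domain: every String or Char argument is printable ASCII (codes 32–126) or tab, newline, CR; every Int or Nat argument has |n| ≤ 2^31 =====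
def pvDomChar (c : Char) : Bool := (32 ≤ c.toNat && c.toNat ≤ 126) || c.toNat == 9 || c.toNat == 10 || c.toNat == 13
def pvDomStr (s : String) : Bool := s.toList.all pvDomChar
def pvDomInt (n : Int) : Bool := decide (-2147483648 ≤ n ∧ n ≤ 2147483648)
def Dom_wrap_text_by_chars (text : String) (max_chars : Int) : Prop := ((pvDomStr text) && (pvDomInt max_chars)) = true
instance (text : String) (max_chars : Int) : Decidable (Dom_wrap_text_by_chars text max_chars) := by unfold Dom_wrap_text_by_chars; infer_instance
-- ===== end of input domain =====

-- B replaces A's char-by-char accumulator loop by split-on-newline + per-segment fixed-size slicing (measured faster by bulk slicing instead of per-character concatenation).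

-- ===== PORT A =====
-- A's loop over the characters; state = (lines, cur); the cur string is handled as a char list, String.ofList at append time.
def wrapLoopA (m : Int) : List Char → List String → List Char → List String
  | [], lines, cur => if cur ≠ [] then lines ++ [String.ofList cur] else lines
  | c :: rest, lines, cur =>
    if c = '\n' then
      wrapLoopA m rest (lines ++ [String.ofList cur]) []
    else
      let cur' := cur ++ [c]
      if (cur'.length : Int) ≥ m then wrapLoopA m rest (lines ++ [String.ofList cur']) []
      else wrapLoopA m rest lines cur'

def wrap_text_by_chars (text : String) (max_chars : Int) : List String :=
  wrapLoopA max_chars text.toList [] []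

-- ===== PORT B =====
-- Source B's inner while loop 'while i < len(seg): out.append(seg[i:i+e]); i += e';
-- he : 1 ≤ e only justifies termination (Source B always calls it with e = max(max_chars,1) ≥ 1)
def chunkLoop (e : Nat) (he : 1 ≤ e) (seg : List Char) (i : Nat) (out : List String) : List String :=
  if i < seg.length then
    chunkLoop e he seg (i + e)
      (out ++ [String.ofList (PySem.List.slice seg (some (i : Int)) (some ((i : Int) + (e : Int))))])
  else out
  termination_by seg.length - i
  decreasing_by omega

-- Source B's body after 'segs = text.split('\n')': the for-loop over segs[:-1], then the last segment;
-- segs from split is never [], so the '-1' lookup's .getD branch is unreachable (Python never raises there)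
def emitAll (e : Nat) (he : 1 ≤ e) (segs : List (List Char)) : List String :=
  let out := (PySem.List.slice segs none (some (-1))).foldl
    (fun out seg =>
      let out2 := chunkLoop e he seg 0 out
      if seg.length % e = 0 then out2 ++ [""] else out2) []
  chunkLoop e he ((PySem.List.pyGet? segs (-1)).getD []) 0 out

def wrap_text_by_chars_alt (text : String) (max_chars : Int) : List String :=
  emitAll (max max_chars 1).toNat (by omega) (PySem.Chars.splitOn text.toList ['\n'])

-- ===== PRECONDITION & SPEC =====
def Spec_wrap_text_by_chars (text : String) (max_chars : Int) (out : List String) : Prop := out = wrap_text_by_chars_alt text max_chars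
instance (text : String) (max_chars : Int) (out : List String) : Decidable (Spec_wrap_text_by_chars text max_chars out) := by unfold Spec_wrap_text_by_chars; infer_instance

-- ===== CLAIM (what is proved, stated in full; the proofs are below) =====
def Claim_equal_wrap_text_by_chars : Prop := ∀ (text : String) (max_chars : Int), Dom_wrap_text_by_chars text max_chars → Spec_wrap_text_by_chars text max_chars (wrap_text_by_chars text max_chars)

-- ===== LEMMAS AND PROOFS =====

-- reference splitter: split a char list on '\n'
def splitNl : List Char → List (List Char)
  | [] => [[]]
  | c :: rest =>
    if c = '\n' then [] :: splitNl rest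
    else
      match splitNl rest with
      | r :: rs => (c :: r) :: rs
      | [] => [[c]]

-- reference chunker: cut into pieces of length e (e ≥ 1 at every use)
def chunksB (e : Nat) : List Char → List String
  | [] => []
  | c :: rest => String.ofList (c :: rest.take (e - 1)) :: chunksB e (rest.drop (e - 1))
  termination_by s => s.length
  decreasing_by simp

-- reference emitter: chunks of every segment, '' after each non-final segment of length ≡ 0 (mod e)
def emitB (e : Nat) : List (List Char) → List String
  | [] => []
  | [seg] => chunksB e seg
  | seg :: rest => chunksB e seg ++ (if seg.length % e = 0 then [""] else []) ++ emitB e rest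

theorem splitNl_ne_nil (cs : List Char) : splitNl cs ≠ [] := by
  cases cs with
  | nil => simp [splitNl]
  | cons c rest =>
    simp only [splitNl]
    split
    · simp
    · cases h : splitNl rest <;> simp

-- splitNl cs with cur prepended onto its first segment
def splitCons (cur cs : List Char) : List (List Char) :=
  match splitNl cs with
  | r :: rs => (cur ++ r) :: rs
  | [] => [cur]

theorem splitCons_nil_left (cs : List Char) : splitCons [] cs = splitNl cs := by
  unfold splitCons
  cases h : splitNl cs with
  | nil => exact absurd h (splitNl_ne_nil cs)
  | cons r rs => simp

theorem splitCons_cons_ne (cur : List Char) (c : Char) (rest : List Char) (hc : ¬ c = '\n') :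
    splitCons cur (c :: rest) = splitCons (cur ++ [c]) rest := by
  obtain ⟨r, rs, hr⟩ : ∃ r rs, splitNl rest = r :: rs := by
    cases h : splitNl rest with
    | nil => exact absurd h (splitNl_ne_nil rest)
    | cons a b => exact ⟨a, b, rfl⟩
  simp [splitCons, splitNl, hc, hr]

theorem chunksB_nil (e : Nat) : chunksB e [] = [] := by
  rw [chunksB.eq_def]

theorem chunksB_cons (e : Nat) (c : Char) (rest : List Char) :
    chunksB e (c :: rest)
      = String.ofList (c :: rest.take (e - 1)) :: chunksB e (rest.drop (e - 1)) := by
  rw [chunksB.eq_def]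

theorem chunksB_short (e : Nat) (s : List Char) (h2 : s.length ≤ e) :
    chunksB e s = if s = [] then [] else [String.ofList s] := by
  cases s with
  | nil => simp [chunksB_nil]
  | cons c rest =>
    have h : rest.length ≤ e - 1 := by simp at h2; omega
    rw [chunksB.eq_def]
    simp [List.take_of_length_le h, List.drop_eq_nil_of_le h, chunksB_nil]

theorem chunksB_prepend (e : Nat) (p s : List Char) (hp : p.length = e) (he : 1 ≤ e) :
    chunksB e (p ++ s) = String.ofList p :: chunksB e s := by
  cases p with
  | nil => simp at hp; omega
  | cons c p' =>
    have h : p'.length = e - 1 := by simp at hp; omega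
    rw [List.cons_append, chunksB.eq_def]
    simp [List.take_left' h, List.drop_left' h]

theorem emitB_prepend (e : Nat) (p s : List Char) (ss : List (List Char))
    (hp : p.length = e) (he : 1 ≤ e) :
    emitB e ((p ++ s) :: ss) = String.ofList p :: emitB e (s :: ss) := by
  cases ss with
  | nil => simp [emitB, chunksB_prepend e p s hp he]
  | cons r rs =>
    have hmod : (p.length + s.length) % e = s.length % e := by
      rw [hp]; exact Nat.add_mod_left e s.length
    simp [emitB, chunksB_prepend e p s hp he, hmod]

-- ===== A's loop produces emitB over splitCons =====
theorem wrapLoop_eq_emit (m : Int) (e : Nat) (he : 1 ≤ e)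
    (hcond : ∀ k : Nat, 1 ≤ k → ((k : Int) ≥ m ↔ e ≤ k)) :
    ∀ (cs cur : List Char) (lines : List String), cur.length + 1 ≤ e →
      wrapLoopA m cs lines cur = lines ++ emitB e (splitCons cur cs) := by
  intro cs
  induction cs with
  | nil =>
    intro cur lines hcur
    have hs : splitCons cur [] = [cur] := by simp [splitCons, splitNl]
    rw [hs]
    simp only [wrapLoopA, emitB]
    rw [chunksB_short e cur (by omega)]
    by_cases hc : cur = [] <;> simp [hc]
  | cons c rest ih =>
    intro cur lines hcur
    obtain ⟨r, rs, hr⟩ : ∃ r rs, splitNl rest = r :: rs := by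
      cases h : splitNl rest with
      | nil => exact absurd h (splitNl_ne_nil rest)
      | cons a b => exact ⟨a, b, rfl⟩
    have hl1 : (cur ++ [c]).length = cur.length + 1 := by simp
    by_cases hnl : c = '\n'
    · -- newline: flush cur (possibly empty)
      have lhs : wrapLoopA m (c :: rest) lines cur
          = wrapLoopA m rest (lines ++ [String.ofList cur]) [] := by
        rw [wrapLoopA, if_pos hnl]
      rw [lhs, ih [] (lines ++ [String.ofList cur]) (by simp [he]),
          splitCons_nil_left, hr]
      have hsc : splitCons cur (c :: rest) = cur :: r :: rs := by
        simp [splitCons, splitNl, hnl, hr]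
      rw [hsc]
      by_cases hc : cur = []
      · simp [hc, emitB, chunksB_nil]
      · have hlt : cur.length % e = cur.length := Nat.mod_eq_of_lt (by omega)
        have hne : cur.length ≠ 0 := by simpa using hc
        rw [show emitB e (cur :: r :: rs)
              = chunksB e cur ++ (if cur.length % e = 0 then [""] else []) ++ emitB e (r :: rs) from rfl]
        rw [chunksB_short e cur (by omega), hlt]
        simp [hc, hne]
    · have hsc : splitCons cur (c :: rest) = (cur ++ [c] ++ r) :: rs := by
        rw [splitCons_cons_ne cur c rest hnl]
        simp [splitCons, hr]
      by_cases hge : ((cur ++ [c]).length : Int) ≥ m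
      · -- buffer reached e: flush
        have heq : (cur ++ [c]).length = e := by
          have h2 := (hcond (cur.length + 1) (by omega)).1 (by rwa [hl1] at hge)
          rw [hl1]; omega
        have lhs : wrapLoopA m (c :: rest) lines cur
            = wrapLoopA m rest (lines ++ [String.ofList (cur ++ [c])]) [] := by
          rw [wrapLoopA, if_neg hnl]; simp only []; rw [if_pos hge]
        rw [lhs, ih [] _ (by simp [he]), splitCons_nil_left, hr, hsc,
            emitB_prepend e (cur ++ [c]) r rs heq he]
        simp
      · -- buffer still short: keep accumulating
        have hlen : (cur ++ [c]).length + 1 ≤ e := by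
          have h2 : ¬ e ≤ cur.length + 1 := fun hle =>
            hge (by rw [hl1]; exact (hcond (cur.length + 1) (by omega)).2 hle)
          rw [hl1]; omega
        have lhs : wrapLoopA m (c :: rest) lines cur
            = wrapLoopA m rest lines (cur ++ [c]) := by
          rw [wrapLoopA, if_neg hnl]; simp only []; rw [if_neg hge]
        rw [lhs, ih (cur ++ [c]) lines hlen, hsc]
        have hs2 : splitCons (cur ++ [c]) rest = (cur ++ [c] ++ r) :: rs := by
          simp [splitCons, hr]
        rw [hs2]

-- ===== PySem.Chars.splitOn on '\n' is splitNl =====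
theorem splitOn_go_newline (fuel : Nat) :
    ∀ (l cur : List Char) (acc : List (List Char)), l.length < fuel →
      PySem.Chars.splitOn.go ['\n'] fuel l cur acc = acc.reverse ++ splitCons cur.reverse l := by
  induction fuel with
  | zero => intro l cur acc h; omega
  | succ fuel ih =>
    intro l cur acc h
    cases l with
    | nil =>
      rw [PySem.Chars.splitOn.go.eq_def]
      simp [splitCons, splitNl]
    | cons c rest =>
      rw [PySem.Chars.splitOn.go.eq_def]
      by_cases hc : c = '\n'
      · simp only [List.isPrefixOf, hc, beq_self_eq_true, Bool.true_and, if_pos]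
        have hlen : rest.length < fuel := by simp at h; omega
        rw [show List.drop ['\n'].length ('\n' :: rest) = rest from rfl,
            ih rest [] (cur.reverse :: acc) hlen]
        simp only [List.reverse_nil]
        rw [splitCons_nil_left]
        have hne : splitCons cur.reverse ('\n' :: rest) = cur.reverse :: splitNl rest := by
          obtain ⟨a, b, hs⟩ : ∃ a b, splitNl rest = a :: b := by
            cases hs : splitNl rest with
            | nil => exact absurd hs (splitNl_ne_nil rest)
            | cons a b => exact ⟨a, b, rfl⟩
          simp [splitCons, splitNl, hs]
        rw [hne]
        simp
      · have hpre : (['\n'].isPrefixOf (c :: rest)) = false := by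
          simp [List.isPrefixOf]
          exact fun hh => absurd hh.symm hc
        simp only [hpre, Bool.false_eq_true, if_false]
        have hlen : rest.length < fuel := by simp at h; omega
        rw [ih rest (c :: cur) acc hlen, splitCons_cons_ne cur.reverse c rest hc]
        simp
theorem splitOn_newline (s : List Char) :
    PySem.Chars.splitOn s ['\n'] = splitNl s := by
  unfold PySem.Chars.splitOn
  rw [splitOn_go_newline (s.length + 1) s [] [] (by omega)]
  simp [splitCons_nil_left]

-- ===== chunkLoop is chunksB of the remaining suffix =====
theorem chunkLoop_eq (e : Nat) (he : 1 ≤ e) (seg : List Char) :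
    ∀ (n i : Nat) (out : List String), seg.length - i ≤ n →
      chunkLoop e he seg i out = out ++ chunksB e (seg.drop i) := by
  intro n
  induction n with
  | zero =>
    intro i out hn
    rw [chunkLoop.eq_def, if_neg (by omega), List.drop_eq_nil_of_le (by omega), chunksB_nil]
    simp
  | succ n ih =>
    intro i out hn
    by_cases hi : i < seg.length
    · rw [chunkLoop.eq_def, if_pos hi, ih (i + e) _ (by omega)]
      have hslice : PySem.List.slice seg (some (i : Int)) (some ((i : Int) + (e : Int)))
          = (seg.drop i).take e := PySem.List.slice_natCast_add seg i e
      cases hd : seg.drop i with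
      | nil => exact absurd hd (by simp; omega)
      | cons c rest =>
        have ht : (c :: rest).take e = c :: rest.take (e - 1) := by
          rw [show e = (e - 1) + 1 from by omega]
          simp
        have hdd : rest.drop (e - 1) = seg.drop (i + e) := by
          have h2 : rest.drop (e - 1) = (c :: rest).drop e := by
            rw [show e = (e - 1) + 1 from by omega]
            simp
          rw [h2, ← hd, List.drop_drop]
        have hck : chunksB e (c :: rest)
            = String.ofList ((c :: rest).take e) :: chunksB e (seg.drop (i + e)) := by
          rw [chunksB_cons, ht, hdd]
        rw [hslice, hd, hck]
        simp
    · rw [chunkLoop.eq_def, if_neg hi, List.drop_eq_nil_of_le (by omega), chunksB_nil]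
      simp

-- ===== the for-loop over segs[:-1] plus the last segment is emitB =====
theorem pyGet_cons_neg_one (x y : List Char) (ys : List (List Char)) :
    PySem.List.pyGet? (x :: y :: ys) (-1) = PySem.List.pyGet? (y :: ys) (-1) := by
  simp [PySem.List.pyGet?, PySem.List.pyIdx?]
  rfl

theorem fold_emit (e : Nat) (he : 1 ≤ e) :
    ∀ (segs : List (List Char)), segs ≠ [] → ∀ (out : List String),
      chunkLoop e he ((PySem.List.pyGet? segs (-1)).getD []) 0
        (segs.dropLast.foldl (fun out seg =>
          if seg.length % e = 0 then chunkLoop e he seg 0 out ++ [""] else chunkLoop e he seg 0 out) out)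
      = out ++ emitB e segs := by
  intro segs
  induction segs with
  | nil => intro h; exact absurd rfl h
  | cons seg rest ih =>
    intro _ out
    cases rest with
    | nil =>
      have hget : PySem.List.pyGet? [seg] (-1) = some seg := by
        simp [PySem.List.pyGet?, PySem.List.pyIdx?]
      rw [hget]
      simp only [Option.getD_some, show ([seg] : List (List Char)).dropLast = [] from rfl,
        List.foldl_nil]
      rw [chunkLoop_eq e he seg seg.length 0 out (by omega)]
      simp [emitB]
    | cons r rs =>
      rw [pyGet_cons_neg_one seg r rs,
          show (seg :: r :: rs).dropLast = seg :: (r :: rs).dropLast from rfl,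
          List.foldl_cons,
          ih (by simp)]
      rw [chunkLoop_eq e he seg seg.length 0 out (by omega)]
      rw [show emitB e (seg :: r :: rs)
            = chunksB e seg ++ (if seg.length % e = 0 then [""] else []) ++ emitB e (r :: rs) from rfl]
      split_ifs <;> simp

theorem emitAll_eq (e : Nat) (he : 1 ≤ e) (segs : List (List Char)) (h : segs ≠ []) :
    emitAll e he segs = emitB e segs := by
  unfold emitAll
  rw [PySem.List.slice_to_neg_one]
  simpa using fold_emit e he segs h []

-- ===== VERDICT (by name: the statement is the Claim_ definition above) =====
theorem wrap_text_by_chars_spec : Claim_equal_wrap_text_by_chars := by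
  intro text m _
  unfold Spec_wrap_text_by_chars wrap_text_by_chars wrap_text_by_chars_alt
  have he : 1 ≤ (max m 1).toNat := by omega
  rw [splitOn_newline, emitAll_eq _ _ _ (splitNl_ne_nil text.toList),
      wrapLoop_eq_emit m (max m 1).toNat he (by intro k hk; omega) text.toList [] [] (by simp),
      splitCons_nil_left]
  simp
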